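-- pv_equiv track=rewrite | github.com/tawanda2020-wq/DEVTOWN-AI-AGENTS-BOOTCAMP-FILES | ai-qa-helper/agent/agent_logic.py | is_factual_query
-- ===== SOURCE A (Python) =====
-- def is_factual_query(user_message: str) -> bool:
--     """
--     Determine if the user's message is asking for factual information.
--
--     Args:
--         user_message (str): The user's input message
--
--     Returns:
--         bool: True if the query appears to be factual, False otherwise
--     """
--     factual_keywords = [
--         "what is", "what are", "define", "explain", "tell me about",
--         "how does", "describe", "who is", "where is", "when was",
--         "information about", "details about", "facts about"
--     ]
--
--     message_lower = user_message.lower()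
--
--     # Check if any factual keyword is in the message
--     for keyword in factual_keywords:
--         if keyword in message_lower:
--             return True
--
--     return False
-- ===== SOURCE B (Python) =====
-- def is_factual_query(user_message: str) -> bool:
--     """
--     Determine if the user's message is asking for factual information.
--
--     Single left-to-right scan over positions of the lowered message:
--     at each position, test whether any keyword phrase starts there.
--     """
--     factual_keywords = [
--         "what is", "what are", "define", "explain", "tell me about",
--         "how does", "describe", "who is", "where is", "when was",
--         "information about", "details about", "facts about"
--     ]
--
--     m = user_message.lower()
--     for i in range(len(m)):
--         for kw in factual_keywords:
--             if m.startswith(kw, i):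
--                 return True
--     return False
-- ===== Notes on version B (the rewrite author's own statement) =====
-- stated objective: alternative
-- what changed: Replaces the keyword-major loop of whole-string substring membership tests with a position-major single scan over the lowered message that tests at each index whether any keyword phrase starts there via startswith with an offset.
import Mathlib
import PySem

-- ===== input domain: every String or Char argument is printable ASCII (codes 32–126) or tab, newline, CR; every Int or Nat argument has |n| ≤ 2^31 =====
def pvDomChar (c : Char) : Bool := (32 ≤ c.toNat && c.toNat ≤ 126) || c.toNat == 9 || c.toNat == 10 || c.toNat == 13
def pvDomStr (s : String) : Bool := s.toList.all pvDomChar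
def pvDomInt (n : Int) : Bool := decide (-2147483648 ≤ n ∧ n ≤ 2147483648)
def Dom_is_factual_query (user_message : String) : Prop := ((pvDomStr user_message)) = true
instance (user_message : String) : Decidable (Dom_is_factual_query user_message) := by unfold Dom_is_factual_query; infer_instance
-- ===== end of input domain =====

-- B replaces A's keyword-major substring tests by a position-major single scan (alternative decomposition, same cost class).

def factual_keywords : List String :=
  ["what is", "what are", "define", "explain", "tell me about",
   "how does", "describe", "who is", "where is", "when was",
   "information about", "details about", "facts about"]

-- ===== PORT A =====
-- loop over keywords with early return = List.any over the keyword list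
def is_factual_query (user_message : String) : Bool :=
  let message_lower := PySem.Str.lower user_message
  factual_keywords.any (fun kw => PySem.Str.isIn kw message_lower)

-- ===== PORT B =====
-- loop over positions i of the lowered message; m.startswith(kw, i) = prefix test on (toList).drop i
def is_factual_query_alt (user_message : String) : Bool :=
  let m := (PySem.Str.lower user_message).toList
  (List.range m.length).any (fun i =>
    factual_keywords.any (fun kw => PySem.Chars.startswith (m.drop i) kw.toList))

-- ===== PRECONDITION & SPEC =====
def Spec_is_factual_query (user_message : String) (out : Bool) : Prop := out = is_factual_query_alt user_message
instance (user_message : String) (out : Bool) : Decidable (Spec_is_factual_query user_message out) := by unfold Spec_is_factual_query; infer_instance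

-- ===== CLAIM (what is proved, stated in full; the proofs are below) =====
def Claim_equal_is_factual_query : Prop := ∀ (user_message : String), Dom_is_factual_query user_message → Spec_is_factual_query user_message (is_factual_query user_message)

-- ===== LEMMAS AND PROOFS =====

-- every keyword is a nonempty string
theorem factual_keywords_ne_nil : ∀ kw ∈ factual_keywords, kw.toList ≠ [] := by decide

-- for a nonempty pattern, 'sub in s' is a match starting at some position i < s.length
theorem isIn_iff_exists_pos (sub s : List Char) (hne : sub ≠ []) :
    PySem.Chars.isIn sub s = true ↔ ∃ i < s.length, sub <+: s.drop i := by
  rw [← PySem.Chars.exists_prefix_drop_iff_isIn]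
  constructor
  · rintro ⟨j, hj⟩
    refine ⟨j, ?_, hj⟩
    by_contra h
    rw [List.drop_eq_nil_of_le (by omega)] at hj
    exact hne (List.prefix_nil.mp hj)
  · rintro ⟨i, _, hi⟩; exact ⟨i, hi⟩

-- ===== VERDICT (by name: the statement is the Claim_ definition above) =====
theorem is_factual_query_spec : Claim_equal_is_factual_query := by
  intro s _
  unfold Spec_is_factual_query is_factual_query is_factual_query_alt
  rw [Bool.eq_iff_iff]
  simp only [List.any_eq_true, List.mem_range, PySem.Chars.startswith_iff,
    PySem.Str.isIn_eq]
  constructor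
  · rintro ⟨kw, hkw, hin⟩
    obtain ⟨i, hlt, hpre⟩ :=
      (isIn_iff_exists_pos kw.toList _ (factual_keywords_ne_nil kw hkw)).mp hin
    exact ⟨i, hlt, kw, hkw, hpre⟩
  · rintro ⟨i, hlt, kw, hkw, hpre⟩
    exact ⟨kw, hkw,
      (isIn_iff_exists_pos kw.toList _ (factual_keywords_ne_nil kw hkw)).mpr ⟨i, hlt, hpre⟩⟩
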